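-- pv_equiv track=rewrite | github.com/selenozkan/MacroBuilder | fixPairs.py | checkredcon
-- ===== SOURCE A (Python) =====
-- def checkredcon(chain_names):
--     """
--     Checks inconsistency (chain-identifier of same structure different in different pairs) or redundancy
--     (chain name appears for more than one structure) of chain-identifiers for the input structures. Returns
--     a string with 'True' or 'False' value.
--     """
--     chains = []
--     fix = False
--     for prot in chain_names:
--         if len(chain_names[prot]) != 1:
--             fix = True
--         for chain in chain_names[prot][0]:
--             if chain not in chains:
--                 chains.append(chain)
--             else:
--                 fix = True
--     return (fix)
-- ===== SOURCE B (Python) =====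
-- def checkredcon(chain_names):
--     """
--     Checks inconsistency (chain-identifier of same structure different in different pairs) or redundancy
--     (chain name appears for more than one structure) of chain-identifiers for the input structures.
--     """
--     if any(len(chain_names[prot]) != 1 for prot in chain_names):
--         return True
--     flat = sorted(chain for prot in chain_names for chain in chain_names[prot][0])
--     return any(a == b for a, b in zip(flat, flat[1:]))
-- ===== Notes on version B (the rewrite author's own statement) =====
-- stated objective: alternative
-- what changed: Replaces A's incremental list-membership duplicate detection (growing a 'chains' list and testing 'not in' per element) with a sort-then-adjacent-scan: after an early-exit any() over the value lengths, all first chain lists are flattened, sorted, and a duplicate exists iff some adjacent pair of the sorted list is equal.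
import Mathlib
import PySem

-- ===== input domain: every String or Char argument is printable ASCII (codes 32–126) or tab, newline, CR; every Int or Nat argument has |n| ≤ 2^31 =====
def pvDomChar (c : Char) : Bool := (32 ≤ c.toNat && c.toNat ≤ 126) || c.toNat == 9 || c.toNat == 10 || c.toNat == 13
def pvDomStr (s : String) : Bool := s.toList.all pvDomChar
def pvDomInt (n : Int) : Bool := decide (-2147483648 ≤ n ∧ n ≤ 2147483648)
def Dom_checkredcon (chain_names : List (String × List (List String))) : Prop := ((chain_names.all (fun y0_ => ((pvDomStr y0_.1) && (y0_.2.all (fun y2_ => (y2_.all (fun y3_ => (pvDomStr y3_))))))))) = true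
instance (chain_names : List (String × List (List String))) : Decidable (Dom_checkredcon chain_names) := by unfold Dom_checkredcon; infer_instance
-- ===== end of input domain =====

-- B replaces A's incremental list-membership duplicate detection with an early-exit length
-- check followed by sort-then-adjacent-scan over the flattened chain lists; objective: alternative.

-- ===== PORT A =====
-- A: one pass over the dict; keeps a list `chains` of chains seen so far, flags `fix` on a
-- length ≠ 1 value or on a chain already in `chains`. `headD []` is chain_names[prot][0],
-- total under Pre_ (every value list nonempty).
def checkredcon (chain_names : List (String × List (List String))) : Bool :=
  (chain_names.foldl
    (fun (st : List String × Bool) prot =>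
      let st1 : List String × Bool := (st.1, st.2 || decide (prot.2.length ≠ 1))
      (prot.2.headD []).foldl
        (fun (st : List String × Bool) chain =>
          if chain ∈ st.1 then (st.1, true) else (st.1 ++ [chain], st.2))
        st1)
    ([], false)).2

-- ===== PORT B =====
-- B: early return on any value of length ≠ 1; otherwise flatten, sort, and scan adjacent pairs.
def checkredcon_alt (chain_names : List (String × List (List String))) : Bool :=
  if chain_names.any (fun prot => decide (prot.2.length ≠ 1)) then true
  else
    let flat := PySem.List.sorted (chain_names.flatMap (fun prot => prot.2.headD [])) (fun x => x) false
    (flat.zip (flat.drop 1)).any (fun ab => ab.1 == ab.2)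

-- ===== PRECONDITION & SPEC =====
-- Pre_ excludes exactly the inputs where some structure maps to an empty list of chain lists:
-- there Python A raises IndexError on chain_names[prot][0].
def Pre_checkredcon (chain_names : List (String × List (List String))) : Prop :=
  ∀ p ∈ chain_names, p.2 ≠ []

instance (chain_names : List (String × List (List String))) : Decidable (Pre_checkredcon chain_names) := by
  unfold Pre_checkredcon; infer_instance

def pvWitness_checkredcon : (List (String × List (List String))) :=
  [("protA", [["A", "B"]]), ("protB", [["C"], ["D"]])]

def Spec_checkredcon (chain_names : List (String × List (List String))) (out : Bool) : Prop := out = checkredcon_alt chain_names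
instance (chain_names : List (String × List (List String))) (out : Bool) : Decidable (Spec_checkredcon chain_names out) := by unfold Spec_checkredcon; infer_instance

-- ===== CLAIM (what is proved, stated in full; the proofs are below) =====
def Claim_equal_checkredcon : Prop := ∀ (chain_names : List (String × List (List String))), Dom_checkredcon chain_names → Pre_checkredcon chain_names → Spec_checkredcon chain_names (checkredcon chain_names)

-- ===== LEMMAS AND PROOFS =====

theorem innerFold (l : List String) (cs : List String) (fix : Bool) (h : cs.Nodup) :
    l.foldl (fun (st : List String × Bool) chain =>
        if chain ∈ st.1 then (st.1, true) else (st.1 ++ [chain], st.2)) (cs, fix)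
      = (PySem.Set.update cs l, fix || !decide (cs ++ l).Nodup) := by
  induction l generalizing cs fix with
  | nil => simp [PySem.Set.update_nil, h]
  | cons c l ih =>
    by_cases hc : c ∈ cs
    · simp only [List.foldl_cons, if_pos hc]
      rw [ih cs true h, PySem.Set.update_cons]
      have hadd : PySem.Set.add cs c = cs := by
        simp [PySem.Set.add, PySem.Set.contains, hc]
      have hnd : ¬ (cs ++ c :: l).Nodup := by
        intro hn
        rw [List.nodup_append] at hn
        exact hn.2.2 c hc c (by simp) rfl
      simp [hadd, hnd]
    · simp only [List.foldl_cons, if_neg hc]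
      have hadd : PySem.Set.add cs c = cs ++ [c] := by
        simp [PySem.Set.add, PySem.Set.contains, hc]
      have h2 : (cs ++ [c]).Nodup := by
        rw [List.nodup_append]
        refine ⟨h, List.nodup_singleton c, ?_⟩
        intro a ha b hb hab
        simp only [List.mem_singleton] at hb
        exact hc (hb ▸ hab ▸ ha)
      rw [ih (cs ++ [c]) fix h2, PySem.Set.update_cons, hadd]
      have : cs ++ [c] ++ l = cs ++ c :: l := by simp
      rw [this]

theorem nodup_split (cs l rest : List String) (h : cs.Nodup) :
    (cs ++ (l ++ rest)).Nodup ↔ ((cs ++ l).Nodup ∧ ((PySem.Set.update cs l) ++ rest).Nodup) := by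
  have hu : (PySem.Set.update cs l).Nodup := PySem.Set.nodup_update cs l h
  constructor
  · intro hn
    rw [← List.append_assoc, List.nodup_append] at hn
    refine ⟨hn.1, ?_⟩
    rw [List.nodup_append]
    refine ⟨hu, hn.2.1, ?_⟩
    intro x hx b hb hxb
    rw [PySem.Set.mem_update] at hx
    exact hn.2.2 x (by simp [hx]) b hb hxb
  · intro ⟨h1, h2⟩
    rw [← List.append_assoc, List.nodup_append]
    rw [List.nodup_append] at h2
    refine ⟨h1, h2.2.1, ?_⟩
    intro x hx b hb hxb
    refine h2.2.2 x ?_ b hb hxb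
    rw [PySem.Set.mem_update]; simpa using hx

theorem bool_aux (f d q a b : Bool) : ((f || d || !a || q) || !b) = (f || (d || q) || !(a && b)) := by
  cases f <;> cases d <;> cases q <;> cases a <;> cases b <;> rfl

theorem outerFold (ps : List (String × List (List String))) (cs : List String) (fix : Bool)
    (h : cs.Nodup) :
    ps.foldl
      (fun (st : List String × Bool) prot =>
        let st1 : List String × Bool := (st.1, st.2 || decide (prot.2.length ≠ 1))
        (prot.2.headD []).foldl
          (fun (st : List String × Bool) chain =>
            if chain ∈ st.1 then (st.1, true) else (st.1 ++ [chain], st.2))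
          st1)
      (cs, fix)
    = (PySem.Set.update cs (ps.flatMap (fun p => p.2.headD [])),
       fix || ps.any (fun p => decide (p.2.length ≠ 1))
           || !decide (cs ++ ps.flatMap (fun p => p.2.headD [])).Nodup) := by
  induction ps generalizing cs fix with
  | nil => simp [PySem.Set.update_nil, h]
  | cons p ps ih =>
    simp only [List.foldl_cons]
    rw [innerFold _ cs _ h]
    rw [ih _ _ (PySem.Set.nodup_update cs _ h)]
    have hflat : (p :: ps).flatMap (fun q => q.2.headD []) =
        (p.2.headD []) ++ ps.flatMap (fun q => q.2.headD []) := by simp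
    rw [hflat, PySem.Set.update_append]
    have hsplit := nodup_split cs (p.2.headD []) (ps.flatMap (fun q => q.2.headD [])) h
    have hdec : decide (cs ++ ((p.2.headD []) ++ ps.flatMap (fun q => q.2.headD []))).Nodup
        = (decide (cs ++ p.2.headD []).Nodup
           && decide ((PySem.Set.update cs (p.2.headD [])) ++ ps.flatMap (fun q => q.2.headD [])).Nodup) := by
      rw [decide_eq_decide.mpr hsplit, Bool.decide_and]
    rw [hdec, List.any_cons, bool_aux]

-- On a ≤-sorted list, an equal adjacent pair exists exactly when the list has a duplicate.
theorem adjEq_of_sorted (l : List String) (h : l.Pairwise (· ≤ ·)) :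
    (l.zip (l.drop 1)).any (fun ab => ab.1 == ab.2) = !decide l.Nodup := by
  induction l with
  | nil => simp
  | cons x t ih =>
    cases t with
    | nil => simp
    | cons y t =>
      have hp : (y :: t).Pairwise (· ≤ ·) := h.tail
      have hxle : x ≤ y := (List.pairwise_cons.mp h).1 y (by simp)
      by_cases hxy : x = y
      · have : ¬ (x :: y :: t).Nodup := by
          intro hn; exact (List.nodup_cons.mp hn).1 (by simp [hxy])
        simp [List.any_cons, hxy, this]
      · have hmem : x ∉ y :: t := by
          intro hx
          have hyx : y ≤ x := by
            rcases List.mem_cons.mp hx with h1 | h1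
            · exact le_of_eq h1.symm
            · exact List.rel_of_pairwise_cons hp h1
          exact hxy (le_antisymm hxle hyx)
        have hnd : (x :: y :: t).Nodup ↔ (y :: t).Nodup := by
          rw [List.nodup_cons]; exact ⟨And.right, fun hn => ⟨hmem, hn⟩⟩
        have hbe : (x == y) = false := by simp [hxy]
        have ih' := ih hp
        simp only [List.drop_one, List.tail_cons] at ih'
        simp only [List.drop_succ_cons, List.drop_zero, List.zip_cons_cons, List.any_cons, hbe,
          Bool.false_or]
        rw [ih', decide_eq_decide.mpr hnd]

-- ===== VERDICT (by name: the statement is the Claim_ definition above) =====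
theorem checkredcon_spec : Claim_equal_checkredcon := by
  intro cn _ _
  unfold Spec_checkredcon checkredcon checkredcon_alt
  rw [outerFold cn [] false List.nodup_nil]
  simp only [List.nil_append, Bool.false_or]
  set l := cn.flatMap (fun p => p.2.headD []) with hl
  set s := PySem.List.sorted l (fun x => x) false with hs
  have hperm : s.Perm l := PySem.List.sorted_perm l (fun x => x) false
  have hpw : s.Pairwise (· ≤ ·) := by
    simpa using PySem.List.sorted_pairwise l (fun x => x)
  have hadj := adjEq_of_sorted s hpw
  have hnd : s.Nodup ↔ l.Nodup := hperm.nodup_iff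
  by_cases hA : cn.any (fun p => decide (p.2.length ≠ 1))
  · have hA2 : (cn.any fun p => !decide (p.2.length = 1)) = true := by simpa using hA
    simp [hA2]
  · have hA' : (cn.any fun p => decide (p.2.length ≠ 1)) = false := by simpa using hA
    have hdd : decide s.Nodup = decide l.Nodup := decide_eq_decide.mpr hnd
    simp only [hA', Bool.false_or, Bool.false_eq_true, if_false]
    rw [hadj, hdd]
    rfl
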